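-- pv_equiv track=rewrite | github.com/alswo1212/jungle_baekjoon | 백준/Silver/3085. 사탕 게임/사탕 게임.py | check_hor
-- ===== SOURCE A (Python) =====
-- def check_hor(board:list[str], y:int)->int:
--     cnt, temp = 0, 0
--     c = board[y][0]
--     for i in range(len(board)):
--         if c == board[y][i]:
--             temp += 1
--         else:
--             c = board[y][i]
--             temp = 1
--         if temp > cnt:
--             cnt = temp
--     return cnt
-- ===== SOURCE B (Python) =====
-- def check_hor(board: list[str], y: int) -> int:
--     row = board[y]
--     n = len(board)
--     best = 0
--     for i in range(n):
--         j = i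
--         while j < n and row[j] == row[i]:
--             j += 1
--         if j - i > best:
--             best = j - i
--     return best
-- ===== Notes on version B (the rewrite author's own statement) =====
-- stated objective: alternative
-- what changed: Replaces A's single-pass run-counter state machine (cnt/temp/current-char) by a brute-force scan: for every start position i, an inner while loop measures the run of equal characters starting at i, and the maximum of these lengths is returned.
import Mathlib
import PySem

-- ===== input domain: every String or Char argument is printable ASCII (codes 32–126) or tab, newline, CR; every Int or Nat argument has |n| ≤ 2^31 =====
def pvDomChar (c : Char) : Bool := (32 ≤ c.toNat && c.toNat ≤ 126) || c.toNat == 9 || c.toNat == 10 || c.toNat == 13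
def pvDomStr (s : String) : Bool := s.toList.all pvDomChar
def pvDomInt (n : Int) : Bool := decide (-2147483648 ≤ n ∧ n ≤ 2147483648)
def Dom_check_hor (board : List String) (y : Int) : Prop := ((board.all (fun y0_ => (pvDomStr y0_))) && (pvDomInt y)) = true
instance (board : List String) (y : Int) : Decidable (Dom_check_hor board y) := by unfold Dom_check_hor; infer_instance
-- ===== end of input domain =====

-- B replaces A's single-pass cnt/temp/current-char state machine by a brute-force scan:
-- for every start position an inner while loop measures the run starting there, and the
-- maximum of these lengths is returned (objective: alternative; not faster).

-- ===== PORT A =====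
-- one iteration of A's for-loop body on the state (cnt, temp, c), fed board[y][i]
def stepA (st : Int × Int × Char) (ch : Char) : Int × Int × Char :=
  match st with
  | (cnt, temp, c) =>
    let tc : Char × Int := if c == ch then (c, temp + 1) else (ch, 1)
    let cnt' : Int := if tc.2 > cnt then tc.2 else cnt
    (cnt', tc.2, tc.1)

def check_hor (board : List String) (y : Int) : Int :=
  let row : List Char := (PySem.List.pyGetD board y "").toList
  let c : Char := PySem.List.pyGetD row 0 ' '   -- board[y][0]
  ((PySem.List.pyRange 0 (board.length : Int)).foldl
      (fun st i => stepA st (PySem.List.pyGetD row i ' ')) (0, 0, c)).1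

-- ===== PORT B =====
-- the inner 'while j < n and row[j] == row[i]: j += 1' loop (c is row[i]); returns final j
def whileB (row : List Char) (n : Int) (c : Char) (j : Int) : Int :=
  if h : j < n ∧ (PySem.List.pyGetD row j ' ' == c) = true then whileB row n c (j + 1) else j
termination_by (n - j).toNat
decreasing_by omega

def check_hor_alt (board : List String) (y : Int) : Int :=
  let row : List Char := (PySem.List.pyGetD board y "").toList
  let n : Int := (board.length : Int)
  (PySem.List.pyRange 0 n).foldl
    (fun best i =>
      let j := whileB row n (PySem.List.pyGetD row i ' ') i
      if j - i > best then j - i else best) 0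

-- ===== PRECONDITION & SPEC =====
-- Pre_ excludes exactly the inputs where A (and B) raise IndexError: y not a valid (possibly
-- negative) index into board, or row board[y] shorter than len(board) (both programs index
-- board[y][i] for i up to len(board) - 1).
def Pre_check_hor (board : List String) (y : Int) : Prop :=
  PySem.Raise.InRange board.length y ∧
    board.length ≤ ((PySem.List.pyGetD board y "").toList).length
instance (board : List String) (y : Int) : Decidable (Pre_check_hor board y) := by
  unfold Pre_check_hor; infer_instance

def pvWitness_check_hor : List String × Int := (["ab", "ba"], 0)

def Spec_check_hor (board : List String) (y : Int) (out : Int) : Prop := out = check_hor_alt board y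
instance (board : List String) (y : Int) (out : Int) : Decidable (Spec_check_hor board y out) := by unfold Spec_check_hor; infer_instance

-- ===== CLAIM (what is proved, stated in full; the proofs are below) =====
def Claim_equal_check_hor : Prop := ∀ (board : List String) (y : Int), Dom_check_hor board y → Pre_check_hor board y → Spec_check_hor board y (check_hor board y)

-- ===== LEMMAS AND PROOFS =====

-- length of the initial run of character c in a list
def prefCnt (c : Char) : List Char → Int
  | [] => 0
  | x :: xs => if x == c then 1 + prefCnt c xs else 0

-- length of the initial run of a list
def prefRun : List Char → Int
  | [] => 0
  | x :: xs => 1 + prefCnt x xs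

-- max over all nonempty suffixes of the initial-run length = longest run
def suffMax : List Char → Int
  | [] => 0
  | x :: xs => max (prefRun (x :: xs)) (suffMax xs)

lemma prefCnt_nonneg (c : Char) : ∀ xs, 0 ≤ prefCnt c xs := by
  intro xs; induction xs with
  | nil => simp [prefCnt]
  | cons x xs ih => simp only [prefCnt]; split <;> omega

lemma prefRun_nonneg : ∀ xs, 0 ≤ prefRun xs := by
  intro xs; cases xs with
  | nil => simp [prefRun]
  | cons x xs => simp only [prefRun]; have := prefCnt_nonneg x xs; omega

lemma suffMax_nonneg : ∀ xs, 0 ≤ suffMax xs := by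
  intro xs; induction xs with
  | nil => simp [suffMax]
  | cons x xs ih => simp only [suffMax]; have := prefRun_nonneg (x :: xs); omega

-- the supremum of the running 'temp' values A produces while scanning L from state (temp, c)
def supTemp (c : Char) (temp : Int) : List Char → Int
  | [] => temp
  | x :: xs =>
    let t : Int := if c == x then temp + 1 else 1
    max t (supTemp x t xs)

lemma foldl_stepA (L : List Char) : ∀ (c : Char) (temp cnt : Int), temp ≤ cnt →
    (L.foldl stepA (cnt, temp, c)).1 = max cnt (supTemp c temp L) := by
  induction L with
  | nil => intro c temp cnt h; simp [supTemp]; omega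
  | cons x xs ih =>
    intro c temp cnt h
    by_cases hcx : c = x
    · subst hcx
      simp only [List.foldl_cons, stepA, supTemp, beq_self_eq_true, if_true]
      have := ih c (temp + 1) (if temp + 1 > cnt then temp + 1 else cnt) (by split <;> omega)
      rw [this]; omega
    · simp only [List.foldl_cons, stepA, supTemp, beq_iff_eq, hcx, if_false]
      have := ih x 1 (if (1:Int) > cnt then 1 else cnt) (by split <;> omega)
      rw [this]; omega

-- splitting a nonempty list at the end of its first run
lemma suffMax_cons_dropWhile : ∀ (xs : List Char) (c : Char),
    suffMax (c :: xs) = max (prefRun (c :: xs)) (suffMax (xs.dropWhile (fun z => z == c))) := by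
  intro xs
  induction xs with
  | nil => intro c; simp [suffMax, List.dropWhile]
  | cons x xs ih =>
    intro c
    by_cases hxc : x = c
    · subst hxc
      have hdw : (x :: xs).dropWhile (fun z => z == x) = xs.dropWhile (fun z => z == x) := by
        simp [List.dropWhile]
      rw [hdw]
      have h1 : suffMax (x :: x :: xs) = max (prefRun (x :: x :: xs)) (suffMax (x :: xs)) := rfl
      rw [h1, ih x]
      have hp := prefCnt_nonneg x xs
      simp only [prefRun, prefCnt, beq_self_eq_true, if_true]
      omega
    · have hb : (x == c) = false := by simp [hxc]
      have hdw : (x :: xs).dropWhile (fun z => z == c) = x :: xs := by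
        simp [List.dropWhile, hb]
      rw [hdw]
      rfl

-- A's running max from an open run of length k ≥ 1 of character c equals the
-- longest-run value of the remaining text
lemma supTemp_eq_suffMax : ∀ (xs : List Char) (c : Char) (k : Int), 1 ≤ k →
    max k (supTemp c k xs) =
      max (k + prefCnt c xs) (suffMax (xs.dropWhile (fun z => z == c))) := by
  intro xs
  induction xs with
  | nil => intro c k hk; simp [supTemp, prefCnt, suffMax, List.dropWhile]; omega
  | cons x xs ih =>
    intro c k hk
    by_cases hcx : c = x
    · subst hcx
      simp only [supTemp, beq_self_eq_true, if_true]
      have h1 : max k (max (k + 1) (supTemp c (k + 1) xs)) = max (k + 1) (supTemp c (k + 1) xs) := by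
        have := le_max_left (k + 1) (supTemp c (k + 1) xs); omega
      rw [h1, ih c (k + 1) (by omega)]
      have hp := prefCnt_nonneg c xs
      simp only [prefCnt, List.dropWhile, beq_self_eq_true, if_true]
      omega
    · have hxc : (x == c) = false := by simp only [beq_eq_false_iff_ne, ne_eq]; exact fun h => hcx h.symm
      have hcx' : (c == x) = false := by simp only [beq_eq_false_iff_ne, ne_eq]; exact hcx
      simp only [supTemp, hcx', Bool.false_eq_true, if_false]
      have hIH := ih x 1 le_rfl
      have hS := suffMax_cons_dropWhile xs x
      have h2 : max 1 (supTemp x 1 xs) = suffMax (x :: xs) := by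
        rw [hIH, hS]; rfl
      simp only [prefCnt, List.dropWhile, hxc, Bool.false_eq_true, if_false]
      have h3 : suffMax (x :: xs) ≥ 1 := by
        have := prefCnt_nonneg x xs
        simp only [suffMax, prefRun]
        have := suffMax_nonneg xs
        omega
      omega

-- the inner while loop measures j plus the run of c starting at position j of take n row
lemma whileB_eq (row : List Char) (n : Nat) (hnr : n ≤ row.length) (c : Char) :
    ∀ (fuel : Nat) (j : Int), 0 ≤ j → j ≤ (n : Int) → ((n : Int) - j).toNat = fuel →
      whileB row (n : Int) c j = j + prefCnt c ((row.take n).drop j.toNat) := by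
  intro fuel
  induction fuel with
  | zero =>
    intro j h0 hj hf
    have hjn : j = (n : Int) := by omega
    subst hjn
    rw [whileB, dif_neg (by intro h; exact absurd h.1 (lt_irrefl _))]
    have hd : ((row.take n).drop ((n : Int)).toNat) = [] := by
      apply List.drop_eq_nil_of_le
      simp [List.length_take]
    rw [hd]; simp [prefCnt]
  | succ fuel ih =>
    intro j h0 hj hf
    have hjlt : j < (n : Int) := by omega
    have hjN : j.toNat < n := by omega
    have hjR : j.toNat < row.length := by omega
    have hlt : j.toNat < (row.take n).length := by simp [List.length_take]; omega
    have hdrop : (row.take n).drop j.toNat = row[j.toNat] :: (row.take n).drop (j.toNat + 1) := by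
      rw [List.drop_eq_getElem_cons hlt, List.getElem_take]
    have hget : PySem.List.pyGetD row j ' ' = row[j.toNat] :=
      PySem.List.pyGetD_eq_getElem _ _ h0 (by omega)
    by_cases hbeq : (PySem.List.pyGetD row j ' ' == c) = true
    · rw [whileB, dif_pos ⟨hjlt, hbeq⟩, ih (j + 1) (by omega) (by omega) (by omega)]
      have hxc : (row[j.toNat] == c) = true := by rw [← hget]; exact hbeq
      have h1 : (j + 1).toNat = j.toNat + 1 := by omega
      rw [h1, hdrop]
      simp only [prefCnt, hxc, if_true]
      omega
    · rw [whileB, dif_neg (by intro h; exact hbeq h.2), hdrop]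
      have hxc : (row[j.toNat] == c) = false := by
        rw [← hget]; exact Bool.eq_false_iff.mpr (fun h => hbeq h)
      simp only [prefCnt, hxc, Bool.false_eq_true, if_false]
      omega

-- B's outer fold over start positions computes the max over all nonempty suffixes
lemma foldl_range_prefRun : ∀ (L : List Char) (b : Int), 0 ≤ b →
    (List.range L.length).foldl
        (fun best k => if prefRun (L.drop k) > best then prefRun (L.drop k) else best) b
      = max b (suffMax L) := by
  intro L
  induction L with
  | nil => intro b hb; simp [suffMax]; omega
  | cons x xs ih =>
    intro b hb
    rw [List.length_cons, List.range_succ_eq_map, List.foldl_cons, List.foldl_map]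
    simp only [List.drop_zero, List.drop_succ_cons]
    have hbase : (if prefRun (x :: xs) > b then prefRun (x :: xs) else b) = max b (prefRun (x :: xs)) := by
      omega
    rw [hbase, ih (max b (prefRun (x :: xs))) (by have := prefRun_nonneg (x :: xs); omega)]
    simp only [suffMax]
    omega

lemma foldl_pyRange_prefRun (L : List Char) (b : Int) (hb : 0 ≤ b) :
    (PySem.List.pyRange 0 ((L.length : Nat) : Int)).foldl
        (fun best i => if prefRun (L.drop i.toNat) > best then prefRun (L.drop i.toNat) else best) b
      = max b (suffMax L) := by
  rw [PySem.List.pyRange_one]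
  have h0 : (((L.length : Nat) : Int) - 0).toNat = L.length := by omega
  rw [h0, List.foldl_map]
  have hfun : (fun (best : Int) (k : Nat) =>
      if prefRun (L.drop (0 + (k : Int)).toNat) > best then prefRun (L.drop (0 + (k : Int)).toNat) else best)
      = (fun (best : Int) (k : Nat) =>
      if prefRun (L.drop k) > best then prefRun (L.drop k) else best) := by
    funext best k
    simp
  rw [hfun]
  exact foldl_range_prefRun L b hb

-- ===== VERDICT (by name: the statement is the Claim_ definition above) =====
theorem check_hor_spec : Claim_equal_check_hor := by
  intro board y _ hpre
  obtain ⟨hin, hlen⟩ := hpre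
  obtain ⟨h1, h2⟩ := hin
  simp only [Spec_check_hor, check_hor, check_hor_alt]
  set row : List Char := (PySem.List.pyGetD board y "").toList with hrow
  set n : Nat := board.length with hn
  have hnpos : 0 < n := by omega
  set L : List Char := row.take n with hL
  have hLlen : L.length = n := by simp [hL]; omega
  have hgd : ∀ i : Int, 0 ≤ i → i < (L.length : Int) →
      PySem.List.pyGetD row i ' ' = PySem.List.pyGetD L i ' ' := by
    intro i h0 hiL
    have hi2 : i < (n : Int) := by omega
    rw [PySem.List.pyGetD_eq_getElem _ _ h0 (by omega),
        PySem.List.pyGetD_eq_getElem _ _ h0 hiL]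
    exact (List.getElem_take).symm
  -- B side: each start position i contributes prefRun (L.drop i.toNat)
  have hBstep : ∀ (best i : Int), i ∈ PySem.List.pyRange 0 ((n : Nat) : Int) →
      (fun best i =>
        let j := whileB row ((n : Nat) : Int) (PySem.List.pyGetD row i ' ') i
        if j - i > best then j - i else best) best i
      = (fun best i => if prefRun (L.drop i.toNat) > best then prefRun (L.drop i.toNat) else best) best i := by
    intro best i hi
    rw [PySem.List.mem_pyRange_one] at hi
    obtain ⟨hi0, hin'⟩ := hi
    have hiN : i.toNat < n := by omega
    have hiR : i.toNat < row.length := by omega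
    have hget : PySem.List.pyGetD row i ' ' = row[i.toNat] :=
      PySem.List.pyGetD_eq_getElem _ _ hi0 (by omega)
    have hw := whileB_eq row n (by omega) (PySem.List.pyGetD row i ' ') ((n : Int) - i).toNat i hi0 (by omega) rfl
    have hlt : i.toNat < L.length := by omega
    have hdrop : L.drop i.toNat = row[i.toNat] :: L.drop (i.toNat + 1) := by
      rw [hL, List.drop_eq_getElem_cons (by rw [← hL]; exact hlt)]
      congr 1
      exact List.getElem_take
    have hjv : whileB row ((n : Nat) : Int) (PySem.List.pyGetD row i ' ') i - i = prefRun (L.drop i.toNat) := by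
      rw [hw, ← hL, hdrop, hget]
      simp only [prefCnt, prefRun, beq_self_eq_true, if_true]
      omega
    simp only []
    rw [hjv]
  rw [PySem.List.foldl_congr_mem _ _ _ _ hBstep]
  have hBeq : (PySem.List.pyRange 0 ((n : Nat) : Int)).foldl
      (fun best i => if prefRun (L.drop i.toNat) > best then prefRun (L.drop i.toNat) else best) 0
      = suffMax L := by
    have hcast : ((n : Nat) : Int) = ((L.length : Nat) : Int) := by rw [hLlen]
    rw [hcast, foldl_pyRange_prefRun L 0 le_rfl]
    have := suffMax_nonneg L
    omega
  rw [hBeq]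
  -- A side: fold over range(n) reads exactly the characters of L
  have hcongr : (PySem.List.pyRange 0 ((n : Nat) : Int)).foldl
      (fun st i => stepA st (PySem.List.pyGetD row i ' ')) (0, 0, PySem.List.pyGetD row 0 ' ')
      = L.foldl stepA (0, 0, PySem.List.pyGetD row 0 ' ') := by
    rw [← hLlen]
    rw [PySem.List.foldl_congr_mem _ _
        (fun st i => stepA st (PySem.List.pyGetD L i ' ')) _ ?_]
    · exact PySem.List.foldl_pyRange_zero_pyGetD' L ' ' stepA _
    · intro acc i hi
      rw [PySem.List.mem_pyRange_one] at hi
      show stepA acc (PySem.List.pyGetD row i ' ') = stepA acc (PySem.List.pyGetD L i ' ')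
      rw [hgd i hi.1 hi.2]
  rw [hcongr]
  obtain ⟨m, hm⟩ : ∃ m, n = m + 1 := ⟨n - 1, by omega⟩
  obtain ⟨r, rest, hrw⟩ : ∃ r rest, row = r :: rest := by
    cases hcase : row with
    | nil => exfalso; rw [hcase] at hlen; simp at hlen; omega
    | cons a l => exact ⟨a, l, rfl⟩
  have hLcons : L = r :: rest.take m := by rw [hL, hrw, hm, List.take_succ_cons]
  have hc0 : PySem.List.pyGetD row 0 ' ' = r := by rw [hrw, PySem.List.pyGetD_zero_cons]
  rw [hc0, hLcons]
  rw [List.foldl_cons]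
  have hstep : stepA ((0 : Int), (0 : Int), r) r = (1, 1, r) := by
    simp [stepA]
  rw [hstep, foldl_stepA _ r 1 1 le_rfl]
  rw [supTemp_eq_suffMax (rest.take m) r 1 le_rfl]
  rw [suffMax_cons_dropWhile (List.take m rest) r]
  rfl
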